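-- pv_equiv track=rewrite | github.com/Shuaigaodada/delta-trade-app | src/services/wechat_cookie_manager.py | _merge_cookie_kv
-- ===== SOURCE A (Python) =====
-- from typing import Any, Callable, Dict, Optional
--
-- def _merge_cookie_kv(existing_cookie: str, new_cookie: str) -> str:
--     """
--     合并两段 cookie 字符串（都按 "k=v; k2=v2" 形式解析）。
--     new_cookie 优先覆盖 existing_cookie 的同名 key。
--     """
--     def parse(cookie_str: str) -> Dict[str, str]:
--         out: Dict[str, str] = {}
--         if not cookie_str:
--             return out
--         for part in cookie_str.split(";"):
--             part = part.strip()
--             if not part or "=" not in part: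
--                 continue
--             k, v = part.split("=", 1)
--             k = k.strip()
--             v = v.strip()
--             if k:
--                 out[k] = v
--         return out
--
--     old_map = parse(existing_cookie)
--     new_map = parse(new_cookie)
--     old_map.update(new_map)
--
--     # 保持输出稳定：按 key 排序（也可以不排序）
--     return "; ".join([f"{k}={v}" for k, v in sorted(old_map.items())])
-- ===== SOURCE B (Python) =====
-- def _merge_cookie_kv(existing_cookie: str, new_cookie: str) -> str:
--     """Merge two cookie strings without any dict: collect the key=value pairs
--     of both strings in order, stable-sort them by key, then collapse each run
--     of equal keys keeping the last (i.e. newest) pair."""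
--     pairs = []
--     for cookie in (existing_cookie, new_cookie):
--         if not cookie:
--             continue
--         for part in cookie.split(";"):
--             part = part.strip()
--             if not part or "=" not in part:
--                 continue
--             k, v = part.split("=", 1)
--             k = k.strip()
--             if k:
--                 pairs.append((k, v.strip()))
--     pairs.sort(key=lambda p: p[0])      # stable: equal keys keep append order
--     merged = []
--     for kv in pairs:
--         if merged and merged[-1][0] == kv[0]:
--             merged[-1] = kv             # a later pair for the same key wins
--         else:
--             merged.append(kv)
--     return "; ".join(f"{k}={v}" for k, v in merged)
-- ===== Notes on version B (the rewrite author's own statement) =====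
-- stated objective: alternative
-- what changed: B eliminates the dict entirely: it collects all key=value pairs of both strings into one list, stable-sorts the list by key, and collapses adjacent equal-key runs keeping the last pair (sort-then-scan dedup instead of A's two-dict parse plus dict.update).
import Mathlib
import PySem

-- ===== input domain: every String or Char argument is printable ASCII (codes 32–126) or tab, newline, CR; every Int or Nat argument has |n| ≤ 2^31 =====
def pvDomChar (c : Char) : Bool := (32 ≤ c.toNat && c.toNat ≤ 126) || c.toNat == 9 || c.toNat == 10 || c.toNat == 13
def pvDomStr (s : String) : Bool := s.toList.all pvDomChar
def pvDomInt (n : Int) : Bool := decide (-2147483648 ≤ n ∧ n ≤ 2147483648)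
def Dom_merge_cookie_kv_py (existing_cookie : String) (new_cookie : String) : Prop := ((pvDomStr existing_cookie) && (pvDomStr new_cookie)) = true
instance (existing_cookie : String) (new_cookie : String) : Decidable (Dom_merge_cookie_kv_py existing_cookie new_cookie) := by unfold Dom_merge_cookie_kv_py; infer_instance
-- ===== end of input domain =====

-- B merges without any dict: it collects the key=value pairs of both strings into one
-- list, stable-sorts them by key and collapses each run of equal keys keeping the last
-- (newest) pair — a sort-then-scan merge instead of A's two-dict parse + dict.update;
-- objective: alternative algorithm. Return values proved equal.

-- ===== PORT A =====
-- helper `parse` of A, transliterated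
def pvParse (cookie_str : String) : PySem.Dict String String :=
  if cookie_str = "" then PySem.Dict.empty
  else
    ((PySem.Str.split? cookie_str ";").getD []).foldl (fun out part =>
      if PySem.Str.strip part = "" || !(PySem.Str.isIn "=" (PySem.Str.strip part)) then out
      else
        match (PySem.Str.splitMax? (PySem.Str.strip part) "=" 1).getD [] with
        | k :: v :: _ =>
            if PySem.Str.strip k ≠ "" then out.insert (PySem.Str.strip k) (PySem.Str.strip v)
            else out
        | _ => out) PySem.Dict.empty

def merge_cookie_kv_py (existing_cookie : String) (new_cookie : String) : String :=
  let old_map := pvParse existing_cookie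
  let new_map := pvParse new_cookie
  let merged := old_map.update new_map.items
  PySem.Str.join "; " ((PySem.List.sorted2 merged.items (fun p => p.1) (fun p => p.2)).map
    (fun p => p.1 ++ "=" ++ p.2))

-- ===== PORT B =====
def merge_cookie_kv_py_alt (existing_cookie : String) (new_cookie : String) : String :=
  -- pairs: one list of all key=value pairs of both cookies, in order
  let pairs := [existing_cookie, new_cookie].foldl (fun pairs cookie =>
    if cookie = "" then pairs
    else ((PySem.Str.split? cookie ";").getD []).foldl (fun pairs part =>
      if PySem.Str.strip part = "" || !(PySem.Str.isIn "=" (PySem.Str.strip part)) then pairs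
      else
        match (PySem.Str.splitMax? (PySem.Str.strip part) "=" 1).getD [] with
        | k :: v :: _ =>
            if PySem.Str.strip k ≠ "" then pairs ++ [(PySem.Str.strip k, PySem.Str.strip v)]
            else pairs
        | _ => pairs) pairs) []
  -- pairs.sort(key=lambda p: p[0]) — stable
  let sortedPairs := PySem.List.sorted pairs (fun p => p.1)
  -- collapse runs of equal keys, last pair wins (merged[-1] = kv / merged.append(kv))
  let merged := sortedPairs.foldl (fun merged kv =>
    match merged.getLast? with
    | some last => if last.1 = kv.1 then merged.dropLast ++ [kv] else merged ++ [kv]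
    | none => merged ++ [kv]) ([] : List (String × String))
  PySem.Str.join "; " (merged.map (fun p => p.1 ++ "=" ++ p.2))

-- ===== PRECONDITION & SPEC =====
def Spec_merge_cookie_kv_py (existing_cookie : String) (new_cookie : String) (out : String) : Prop := out = merge_cookie_kv_py_alt existing_cookie new_cookie
instance (existing_cookie : String) (new_cookie : String) (out : String) : Decidable (Spec_merge_cookie_kv_py existing_cookie new_cookie out) := by unfold Spec_merge_cookie_kv_py; infer_instance

-- ===== CLAIM (what is proved, stated in full; the proofs are below) =====
def Claim_equal_merge_cookie_kv_py : Prop := ∀ (existing_cookie : String) (new_cookie : String), Dom_merge_cookie_kv_py existing_cookie new_cookie → Spec_merge_cookie_kv_py existing_cookie new_cookie (merge_cookie_kv_py existing_cookie new_cookie)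

-- ===== LEMMAS AND PROOFS =====

-- the per-part action of both parse loops, as an Option-valued parser (proof-side only)
def pvKV (part : String) : Option (String × String) :=
  if PySem.Str.strip part = "" || !(PySem.Str.isIn "=" (PySem.Str.strip part)) then none
  else
    match (PySem.Str.splitMax? (PySem.Str.strip part) "=" 1).getD [] with
    | k :: v :: _ =>
        if PySem.Str.strip k ≠ "" then some (PySem.Str.strip k, PySem.Str.strip v) else none
    | _ => none

def pvKVs (s : String) : List (String × String) :=
  ((PySem.Str.split? s ";").getD []).filterMap pvKV

-- the last pair with key k in l (Python: "the newest assignment to k")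
def pvLast (l : List (String × String)) (k : String) : Option (String × String) :=
  (l.filter (fun p => p.1 == k)).getLast?

-- the dedup step of B's final loop
def pvStepB (merged : List (String × String)) (kv : String × String) : List (String × String) :=
  match merged.getLast? with
  | some last => if last.1 = kv.1 then merged.dropLast ++ [kv] else merged ++ [kv]
  | none => merged ++ [kv]

-- ---------- A's parse loop = Dict.update of the filterMapped parts ----------

theorem pvStep_eq (out : PySem.Dict String String) (part : String) :
    (if PySem.Str.strip part = "" || !(PySem.Str.isIn "=" (PySem.Str.strip part)) then out
     else
       match (PySem.Str.splitMax? (PySem.Str.strip part) "=" 1).getD [] with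
       | k :: v :: _ =>
           if PySem.Str.strip k ≠ "" then out.insert (PySem.Str.strip k) (PySem.Str.strip v)
           else out
       | _ => out)
    = match pvKV part with
      | none => out
      | some kv => out.insert kv.1 kv.2 := by
  unfold pvKV
  split_ifs with h1
  · rfl
  · cases hL : (PySem.Str.splitMax? (PySem.Str.strip part) "=" 1).getD [] with
    | nil => rfl
    | cons k rest =>
        cases rest with
        | nil => rfl
        | cons v rest2 => by_cases h2 : PySem.Str.strip k ≠ "" <;> simp [h2]

theorem pvFoldl_step_eq (parts : List String) (d : PySem.Dict String String) :
    parts.foldl (fun out part =>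
      if PySem.Str.strip part = "" || !(PySem.Str.isIn "=" (PySem.Str.strip part)) then out
      else
        match (PySem.Str.splitMax? (PySem.Str.strip part) "=" 1).getD [] with
        | k :: v :: _ =>
            if PySem.Str.strip k ≠ "" then out.insert (PySem.Str.strip k) (PySem.Str.strip v)
            else out
        | _ => out) d
    = d.update (parts.filterMap pvKV) := by
  induction parts generalizing d with
  | nil => rfl
  | cons p t ih =>
      simp only [List.foldl_cons, List.filterMap_cons]
      rw [pvStep_eq]
      cases h : pvKV p with
      | none => rw [ih]
      | some kv => rw [ih]; rfl

theorem pvParse_eq (s : String) : pvParse s = PySem.Dict.empty.update (pvKVs s) := by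
  unfold pvParse pvKVs
  split_ifs with h
  · subst h; decide
  · exact pvFoldl_step_eq _ _

-- ---------- B's pair-collecting loop = pvKVs e ++ pvKVs n ----------

theorem pvBStep_eq (acc : List (String × String)) (part : String) :
    (if PySem.Str.strip part = "" || !(PySem.Str.isIn "=" (PySem.Str.strip part)) then acc
     else
       match (PySem.Str.splitMax? (PySem.Str.strip part) "=" 1).getD [] with
       | k :: v :: _ =>
           if PySem.Str.strip k ≠ "" then acc ++ [(PySem.Str.strip k, PySem.Str.strip v)]
           else acc
       | _ => acc)
    = acc ++ (pvKV part).toList := by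
  unfold pvKV
  split_ifs with h1
  · simp
  · cases hL : (PySem.Str.splitMax? (PySem.Str.strip part) "=" 1).getD [] with
    | nil => simp
    | cons k rest =>
        cases rest with
        | nil => simp
        | cons v rest2 => by_cases h2 : PySem.Str.strip k ≠ "" <;> simp [h2]

theorem pvBFold_eq (parts : List String) (acc : List (String × String)) :
    parts.foldl (fun acc part =>
      if PySem.Str.strip part = "" || !(PySem.Str.isIn "=" (PySem.Str.strip part)) then acc
      else
        match (PySem.Str.splitMax? (PySem.Str.strip part) "=" 1).getD [] with
        | k :: v :: _ =>
            if PySem.Str.strip k ≠ "" then acc ++ [(PySem.Str.strip k, PySem.Str.strip v)]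
            else acc
        | _ => acc) acc
    = acc ++ parts.filterMap pvKV := by
  induction parts generalizing acc with
  | nil => simp
  | cons p t ih =>
      simp only [List.foldl_cons, List.filterMap_cons]
      rw [pvBStep_eq]
      cases h : pvKV p with
      | none => rw [ih]; simp
      | some kv => rw [ih]; simp

theorem pvKVs_empty : pvKVs "" = [] := by decide

-- ---------- last-occurrence semantics ----------

theorem pvLast_append (a b : List (String × String)) (k : String) :
    pvLast (a ++ b) k = (pvLast b k).or (pvLast a k) := by
  unfold pvLast
  rw [List.filter_append, List.getLast?_append]

theorem pvLast_fst (l : List (String × String)) (k : String) (p : String × String)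
    (h : pvLast l k = some p) : p.1 = k := by
  unfold pvLast at h
  have hm := List.mem_of_getLast? h
  have := List.of_mem_filter hm
  simpa using this

-- (empty.update l).get? k = value of the LAST pair with key k in l
theorem pvGet?_update_last (l : List (String × String)) (k : String) :
    (PySem.Dict.empty.update l).get? k = (pvLast l k).map Prod.snd := by
  induction l using List.reverseRecOn with
  | nil => simp [PySem.Dict.update, pvLast, PySem.Dict.get?_empty]
  | append_singleton l p ih =>
      have h1 : PySem.Dict.empty.update (l ++ [p]) = (PySem.Dict.empty.update l).insert p.1 p.2 := by
        simp [PySem.Dict.update, List.foldl_append]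
      rw [h1, pvLast_append, PySem.Dict.get?_insert]
      by_cases hk : k = p.1
      · subst hk
        simp [pvLast]
      · have hb : (p.1 == k) = false := by
          simp [Ne.symm hk]
        have h2 : pvLast [p] k = none := by simp [pvLast, hb]
        rw [h2, Option.none_or, if_neg hk, ih]

-- get? lemma for A's old_map.update new_map.items (as in the original proof)
theorem pvGet?_update (l : List (String × String)) (d : PySem.Dict String String) (k : String) :
    (d.update l).get? k = ((PySem.Dict.empty.update l).get? k).or (d.get? k) := by
  induction l generalizing d with
  | nil => simp [PySem.Dict.update, PySem.Dict.get?_empty]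
  | cons p t ih =>
      simp only [PySem.Dict.update, List.foldl_cons] at *
      rw [ih, ih (PySem.Dict.empty.insert p.1 p.2)]
      cases h : (PySem.Dict.empty.update t).get? k with
      | some v => simp [PySem.Dict.update] at h ⊢; simp [h]
      | none =>
          simp [PySem.Dict.update] at h ⊢
          simp [h, PySem.Dict.get?_insert]
          split_ifs <;> simp

theorem pvRebuild (d : PySem.Dict String String) (h : d.keys.Nodup) :
    PySem.Dict.empty.update d.items = d := by
  apply PySem.Dict.ext
  have := PySem.Dict.items_foldl_insert_fresh (l := d.items)
    (k := fun p => p.1) (v := fun p => p.2) (d := (PySem.Dict.empty : PySem.Dict String String))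
    (by intro a _; simp) (by simpa [PySem.Dict.keys] using h)
  simpa [PySem.Dict.update] using this

theorem pvNodup_keys (l : List (String × String)) :
    (PySem.Dict.empty.update l).keys.Nodup :=
  PySem.Dict.nodup_keys_update _ _ (by simp [PySem.Dict.keys_empty])

-- ---------- find? characterisations ----------

theorem pvFind?_items (d : PySem.Dict String String) (k : String) (h : d.keys.Nodup) :
    d.items.find? (fun p => p.1 == k) = (d.get? k).map (fun v => (k, v)) := by
  cases hg : d.get? k with
  | some v =>
      have hmem : (k, v) ∈ d.items := PySem.Dict.mem_items_of_get?_eq_some d hg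
      have hs : (d.items.find? (fun p => p.1 == k)).isSome :=
        List.find?_isSome.2 ⟨(k, v), hmem, by simp⟩
      obtain ⟨q, hq⟩ := Option.isSome_iff_exists.1 hs
      have hqm := List.mem_of_find?_eq_some hq
      have hqk : q.1 = k := by simpa using List.find?_some hq
      have hg2 : d.get? q.1 = some q.2 := PySem.Dict.get?_of_mem_items d (by simpa using hqm) h
      rw [hqk, hg] at hg2
      have : q = (k, v) := by
        cases q
        simp_all
      rw [hq, this]
      rfl
  | none =>
      have hk : k ∉ d.keys := (PySem.Dict.get?_eq_none_iff_not_mem_keys d k).1 hg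
      simp only [Option.map_none]
      rw [List.find?_eq_none]
      intro p hp hbeq
      exact hk (by
        have : p.1 = k := by simpa using hbeq
        exact this ▸ PySem.Dict.mem_keys_of_mem_items d hp)

theorem pvFind?_perm (l l' : List (String × String)) (k : String)
    (hnd : (l.map (fun p => p.1)).Nodup) (hp : l.Perm l') :
    l.find? (fun p => p.1 == k) = l'.find? (fun p => p.1 == k) := by
  cases hl : l.find? (fun p => p.1 == k) with
  | some p =>
      have hpm := List.mem_of_find?_eq_some hl
      have hpk : p.1 = k := by simpa using List.find?_some hl
      have hpm' : p ∈ l' := hp.mem_iff.1 hpm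
      have hs : (l'.find? (fun p => p.1 == k)).isSome :=
        List.find?_isSome.2 ⟨p, hpm', by simp [hpk]⟩
      obtain ⟨q, hq⟩ := Option.isSome_iff_exists.1 hs
      have hqm : q ∈ l := hp.mem_iff.2 (List.mem_of_find?_eq_some hq)
      have hqk : q.1 = k := by simpa using List.find?_some hq
      have hpq : p = q :=
        List.inj_on_of_nodup_map hnd hpm hqm (by show p.1 = q.1; rw [hpk, hqk])
      rw [hq, hpq]
  | none =>
      symm
      rw [List.find?_eq_none]
      intro q hq hbeq
      have := List.find?_eq_none.1 hl q (hp.mem_iff.2 hq)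
      exact this hbeq

-- ---------- sorted2 = sorted on key-distinct pair lists (as in the original proof) ----------

theorem pvInsertBy_congr (f g : String × String → String × String → Bool)
    (x : String × String) (ys : List (String × String))
    (h : ∀ y ∈ ys, f x y = g x y) :
    PySem.List.insertBy f x ys = PySem.List.insertBy g x ys := by
  induction ys with
  | nil => rfl
  | cons y t ih =>
      simp only [PySem.List.insertBy]
      rw [h y (by simp)]
      split_ifs
      · rfl
      · rw [ih (by intro z hz; exact h z (by simp [hz]))]

theorem pvFoldl_insertBy_congr (f g : String × String → String × String → Bool)
    (xs : List (String × String)) (S : List (String × String))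
    (hS : ∀ a ∈ S, ∀ b ∈ S, f a b = g a b)
    (hxs : ∀ a ∈ xs, a ∈ S) :
    ∀ acc, (∀ a ∈ acc, a ∈ S) →
      xs.foldl (fun acc x => PySem.List.insertBy f x acc) acc
        = xs.foldl (fun acc x => PySem.List.insertBy g x acc) acc := by
  induction xs with
  | nil => intro acc _; rfl
  | cons x t ih =>
      intro acc hacc
      simp only [List.foldl_cons]
      rw [pvInsertBy_congr f g x acc
        (by intro y hy; exact hS x (hxs x (by simp)) y (hacc y hy))]
      apply ih (by intro a ha; exact hxs a (by simp [ha]))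
      intro a ha
      rcases (PySem.List.mem_insertBy g x a acc).1 ha with h | h
      · exact h ▸ hxs x (by simp)
      · exact hacc a h

theorem pvSorted2_eq_sorted (l : List (String × String))
    (hinj : ∀ a ∈ l, ∀ b ∈ l, a.1 = b.1 → a = b) :
    PySem.List.sorted2 l (fun p => p.1) (fun p => p.2)
      = PySem.List.sorted l (fun p => p.1) := by
  rw [PySem.List.sorted_eq_foldl_insertBy]
  unfold PySem.List.sorted2
  simp only [Bool.false_eq_true, if_false]
  exact pvFoldl_insertBy_congr _ _ l l
    (by
      intro a ha b hb
      by_cases h1 : a.1 = b.1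
      · have hab : a = b := hinj a ha b hb h1
        subst hab
        simp
      · rcases lt_or_gt_of_ne h1 with h | h
        · simp [h, not_lt_of_gt h]
        · simp [h, not_lt_of_gt h])
    (fun a ha => ha) [] (by simp)

-- sorted of a key-nodup list is strictly increasing on keys
theorem pvPairwise_lt (l : List (String × String))
    (hnd : (l.map (fun p => p.1)).Nodup) :
    (PySem.List.sorted l (fun p => p.1)).Pairwise (fun a b => a.1 < b.1) := by
  have hle := PySem.List.sorted_pairwise l (fun p => p.1)
  have hnd' : ((PySem.List.sorted l (fun p => p.1) false).map (fun p => p.1)).Nodup :=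
    (List.Perm.nodup_iff ((PySem.List.sorted_perm l _ false).map _)).2 hnd
  have hne : (PySem.List.sorted l (fun p => p.1) false).Pairwise
      (fun a b => (fun p : String × String => p.1) a ≠ (fun p => p.1) b) :=
    List.pairwise_map.mp hnd'
  exact (hle.and hne).imp (fun h => lt_of_le_of_ne h.1 h.2)

-- ---------- stability of the sort: per-key filter is unchanged ----------

theorem pvInsertBy_pairwise (x : String × String) (acc : List (String × String))
    (h : acc.Pairwise (fun a b => a.1 ≤ b.1)) :
    (PySem.List.insertBy (fun a b => decide (a.1 < b.1)) x acc).Pairwise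
      (fun a b => a.1 ≤ b.1) := by
  induction acc with
  | nil => simp [PySem.List.insertBy]
  | cons y t ih =>
      rcases List.pairwise_cons.1 h with ⟨hy, ht⟩
      simp only [PySem.List.insertBy]
      by_cases hc : x.1 < y.1
      · simp only [hc, decide_true, if_true]
        refine List.pairwise_cons.2 ⟨?_, h⟩
        intro z hz
        rcases List.mem_cons.1 hz with hz | hz
        · exact hz ▸ le_of_lt hc
        · exact le_trans (le_of_lt hc) (hy z hz)
      · simp only [hc, decide_false, Bool.false_eq_true, if_false]
        refine List.pairwise_cons.2 ⟨?_, ih ht⟩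
        intro z hz
        rcases (PySem.List.mem_insertBy _ _ _ _).1 hz with hz | hz
        · exact hz ▸ le_of_not_gt hc
        · exact hy z hz

theorem pvFilter_insertBy (x : String × String) (acc : List (String × String)) (k : String)
    (h : acc.Pairwise (fun a b => a.1 ≤ b.1)) :
    (PySem.List.insertBy (fun a b => decide (a.1 < b.1)) x acc).filter (fun p => p.1 == k)
      = acc.filter (fun p => p.1 == k) ++ if x.1 == k then [x] else [] := by
  induction acc with
  | nil => cases hx : x.1 == k <;> simp [PySem.List.insertBy, List.filter, hx]
  | cons y t ih =>
      rcases List.pairwise_cons.1 h with ⟨hy, ht⟩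
      simp only [PySem.List.insertBy]
      by_cases hc : x.1 < y.1
      · simp only [hc, decide_true, if_true]
        by_cases hx : x.1 = k
        · have hxb : (x.1 == k) = true := by simp [hx]
          have hnil : (y :: t).filter (fun p => p.1 == k) = [] := by
            rw [List.filter_eq_nil_iff]
            intro z hz
            rcases List.mem_cons.1 hz with hz | hz
            · subst hz
              simp only [beq_iff_eq]
              intro hzk
              exact absurd (hzk ▸ hc) (by rw [← hx]; exact lt_irrefl _)
            · have h1 : y.1 ≤ z.1 := hy z hz
              simp only [beq_iff_eq]
              intro hzk
              rw [hzk, ← hx] at h1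
              exact absurd (lt_of_lt_of_le hc h1) (lt_irrefl _)
          rw [List.filter_cons_of_pos (by simpa using hxb), hnil]
          simp [hxb]
        · have hxb : (x.1 == k) = false := by simp [hx]
          rw [List.filter_cons_of_neg (by simp [hxb])]
          simp [hxb]
      · simp only [hc, decide_false, Bool.false_eq_true, if_false]
        rw [List.filter_cons, List.filter_cons, ih ht]
        by_cases hyk : (y.1 == k) = true <;> simp [hyk]

theorem pvFilter_sorted (l : List (String × String)) (k : String) :
    (PySem.List.sorted l (fun p => p.1)).filter (fun p => p.1 == k)
      = l.filter (fun p => p.1 == k) := by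
  rw [PySem.List.sorted_eq_foldl_insertBy]
  have main : ∀ (xs acc : List (String × String)), acc.Pairwise (fun a b => a.1 ≤ b.1) →
      (xs.foldl (fun acc x => PySem.List.insertBy (fun a b => decide (a.1 < b.1)) x acc)
        acc).filter (fun p => p.1 == k)
      = acc.filter (fun p => p.1 == k) ++ xs.filter (fun p => p.1 == k) := by
    intro xs
    induction xs with
    | nil => intro acc _; simp
    | cons x t ih =>
        intro acc hacc
        simp only [List.foldl_cons]
        rw [ih _ (pvInsertBy_pairwise x acc hacc), pvFilter_insertBy x acc k hacc,
          List.filter_cons]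
        by_cases hx : (x.1 == k) = true <;> simp [hx]
  simpa using main l [] (by simp)

-- ---------- B's dedup scan: strictly sorted output, last pair per key ----------

theorem pvLast_cons (kv : String × String) (t : List (String × String)) (k : String) :
    pvLast (kv :: t) k = if kv.1 == k then (pvLast t k).or (some kv) else pvLast t k := by
  unfold pvLast
  rw [List.filter_cons]
  by_cases h : (kv.1 == k) = true
  · rw [if_pos h, if_pos h,
      show kv :: List.filter (fun p => p.1 == k) t = [kv] ++ List.filter (fun p => p.1 == k) t
        from rfl,
      List.getLast?_append]
    simp
  · simp [h]

theorem pvDedup_invariant (s : List (String × String)) :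
    ∀ acc : List (String × String),
    s.Pairwise (fun a b => a.1 ≤ b.1) →
    acc.Pairwise (fun a b => a.1 < b.1) →
    (∀ p ∈ acc.dropLast, ∀ q ∈ s, p.1 < q.1) →
    (∀ p, acc.getLast? = some p → ∀ q ∈ s, p.1 ≤ q.1) →
    (s.foldl pvStepB acc).Pairwise (fun a b => a.1 < b.1) ∧
      ∀ k, (s.foldl pvStepB acc).find? (fun p => p.1 == k)
        = (pvLast s k).or (acc.find? (fun p => p.1 == k)) := by
  induction s with
  | nil =>
      intro acc _ h1 _ _
      exact ⟨h1, fun k => by simp [pvLast]⟩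
  | cons kv t ih =>
      intro acc hs h1 h2 h3
      rcases List.pairwise_cons.1 hs with ⟨hkv, ht⟩
      simp only [List.foldl_cons]
      cases hL : acc.getLast? with
      | none =>
          have hacc : acc = [] := List.getLast?_eq_none_iff.1 hL
          subst hacc
          have hstep : pvStepB [] kv = [kv] := by simp [pvStepB]
          rw [hstep]
          obtain ⟨hP, hF⟩ := ih [kv] ht (by simp)
            (by intro p hp; simp at hp)
            (by
              intro p hp q hq
              simp only [List.getLast?_singleton, Option.some.injEq] at hp
              exact hp ▸ hkv q hq)
          refine ⟨hP, fun k => ?_⟩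
          rw [hF k, pvLast_cons]
          by_cases hk : (kv.1 == k) = true
          · rw [if_pos hk]
            have hone : List.find? (fun p => p.1 == k) [kv] = some kv := by simp [hk]
            rw [hone]
            cases hpt : pvLast t k <;> simp
          · have hk' : (kv.1 == k) = false := by revert hk; cases (kv.1 == k) <;> simp
            rw [if_neg hk]
            have hone : List.find? (fun p => p.1 == k) [kv] = none := by simp [hk']
            rw [hone]
            simp
      | some last =>
          obtain ⟨init, hinit⟩ := List.getLast?_eq_some_iff.1 hL
          have hdl : acc.dropLast = init := by rw [hinit, List.dropLast_concat]
          by_cases he : last.1 = kv.1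
          · -- replace the last pair
            have hstep : pvStepB acc kv = init ++ [kv] := by
              simp [pvStepB, hL, he, hdl]
            rw [hstep]
            have h1' : (init ++ [last]).Pairwise (fun a b => a.1 < b.1) := hinit ▸ h1
            have hpa := List.pairwise_append.1 h1'
            have hinitlt : ∀ p ∈ init, p.1 < kv.1 := fun p hp =>
              he ▸ (hpa.2.2 p hp last (by simp))
            obtain ⟨hP, hF⟩ := ih (init ++ [kv]) ht
              (List.pairwise_append.2 ⟨hpa.1, by simp, by
                intro p hp q hq
                simp only [List.mem_singleton] at hq
                exact hq ▸ hinitlt p hp⟩)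
              (by
                intro p hp q hq
                rw [List.dropLast_concat] at hp
                exact h2 p (hdl ▸ hp) q (List.mem_cons_of_mem kv hq))
              (by
                intro p hp q hq
                rw [List.getLast?_append, List.getLast?_singleton] at hp
                simp only [Option.some_or, Option.some.injEq] at hp
                exact hp ▸ hkv q hq)
            refine ⟨hP, fun k => ?_⟩
            rw [hF k, pvLast_cons, hinit, List.find?_append, List.find?_append]
            by_cases hk : (kv.1 == k) = true
            · rw [if_pos hk]
              have hkk : kv.1 = k := by simpa using hk
              have hfi : List.find? (fun p => p.1 == k) init = none :=
                List.find?_eq_none.2 (fun p hp => by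
                  simpa using ne_of_lt (hkk ▸ hinitlt p hp))
              have h1v : List.find? (fun p => p.1 == k) [kv] = some kv := by simp [hk]
              have h2v : List.find? (fun p => p.1 == k) [last] = some last := by
                simp [he, hkk]
              rw [hfi, h1v, h2v]
              cases hpt : pvLast t k <;> simp
            · have hk' : (kv.1 == k) = false := by revert hk; cases (kv.1 == k) <;> simp
              rw [if_neg hk]
              have hlk : (last.1 == k) = false := by rw [he]; exact hk'
              have h1v : List.find? (fun p => p.1 == k) [kv] = none := by simp [hk']
              have h2v : List.find? (fun p => p.1 == k) [last] = none := by simp [hlk]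
              rw [h1v, h2v]
          · -- append a new key
            have hstep : pvStepB acc kv = acc ++ [kv] := by
              simp [pvStepB, hL, he]
            rw [hstep]
            have hlastle : last.1 ≤ kv.1 := h3 last hL kv (by simp)
            have hlastlt : last.1 < kv.1 := lt_of_le_of_ne hlastle (fun h => he h)
            have haccmem : ∀ p ∈ acc, p.1 < kv.1 := by
              intro p hp
              rw [hinit] at hp
              rcases List.mem_append.1 hp with hp | hp
              · exact h2 p (hdl ▸ hp) kv (by simp)
              · simp only [List.mem_singleton] at hp
                exact hp ▸ hlastlt
            obtain ⟨hP, hF⟩ := ih (acc ++ [kv]) ht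
              (List.pairwise_append.2 ⟨h1, by simp, by
                intro p hp q hq
                simp only [List.mem_singleton] at hq
                exact hq ▸ haccmem p hp⟩)
              (by
                intro p hp q hq
                rw [List.dropLast_concat] at hp
                rw [hinit] at hp
                rcases List.mem_append.1 hp with hp | hp
                · exact h2 p (hdl ▸ hp) q (List.mem_cons_of_mem kv hq)
                · simp only [List.mem_singleton] at hp
                  exact hp ▸ lt_of_lt_of_le hlastlt (hkv q hq))
              (by
                intro p hp q hq
                rw [List.getLast?_append, List.getLast?_singleton] at hp
                simp only [Option.some_or, Option.some.injEq] at hp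
                exact hp ▸ hkv q hq)
            refine ⟨hP, fun k => ?_⟩
            rw [hF k, pvLast_cons, List.find?_append]
            by_cases hk : (kv.1 == k) = true
            · rw [if_pos hk]
              have hkk : kv.1 = k := by simpa using hk
              have hfacc : List.find? (fun p => p.1 == k) acc = none :=
                List.find?_eq_none.2 (fun p hp => by
                  simpa using ne_of_lt (hkk ▸ haccmem p hp))
              have h1v : List.find? (fun p => p.1 == k) [kv] = some kv := by simp [hk]
              rw [hfacc, h1v]
              cases hpt : pvLast t k <;> simp
            · have hk' : (kv.1 == k) = false := by revert hk; cases (kv.1 == k) <;> simp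
              rw [if_neg hk]
              have h1v : List.find? (fun p => p.1 == k) [kv] = none := by simp [hk']
              rw [h1v]
              simp

-- ---------- strictly key-sorted association lists with equal lookups are equal ----------

theorem pvStrictExt (l1 : List (String × String)) :
    ∀ l2 : List (String × String),
    l1.Pairwise (fun a b => a.1 < b.1) → l2.Pairwise (fun a b => a.1 < b.1) →
    (∀ k, l1.find? (fun p => p.1 == k) = l2.find? (fun p => p.1 == k)) → l1 = l2 := by
  induction l1 with
  | nil =>
      intro l2 _ _ hf
      cases l2 with
      | nil => rfl
      | cons q t2 =>
          have h := (hf q.1).symm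
          rw [List.find?_cons_of_pos (by simp)] at h
          simp at h
  | cons p t1 ih =>
      intro l2 h1 h2 hf
      cases l2 with
      | nil =>
          have h := hf p.1
          rw [List.find?_cons_of_pos (by simp)] at h
          simp at h
      | cons q t2 =>
          rcases List.pairwise_cons.1 h1 with ⟨hp1, ht1⟩
          rcases List.pairwise_cons.1 h2 with ⟨hq2, ht2⟩
          have hpq : p = q := by
            by_cases he : q.1 = p.1
            · have h := hf p.1
              rw [List.find?_cons_of_pos (by simp), List.find?_cons_of_pos (by simp [he])] at h
              exact Option.some.inj h
            · have ha := hf p.1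
              rw [List.find?_cons_of_pos (by simp),
                List.find?_cons_of_neg (by simp [he])] at ha
              have hpm : p ∈ t2 := List.mem_of_find?_eq_some ha.symm
              have hqp : q.1 < p.1 := hq2 p hpm
              have hb := (hf q.1).symm
              rw [List.find?_cons_of_pos (by simp),
                List.find?_cons_of_neg (by simp [Ne.symm he])] at hb
              have hqm : q ∈ t1 := List.mem_of_find?_eq_some hb.symm
              exact absurd (lt_trans hqp (hp1 q hqm)) (lt_irrefl _)
          subst hpq
          have htails : ∀ k, t1.find? (fun r => r.1 == k) = t2.find? (fun r => r.1 == k) := by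
            intro k
            by_cases hk : k = p.1
            · subst hk
              rw [List.find?_eq_none.2 (fun r hr => by simpa using ne_of_gt (hp1 r hr)),
                List.find?_eq_none.2 (fun r hr => by simpa using ne_of_gt (hq2 r hr))]
            · have h := hf k
              rw [List.find?_cons_of_neg (by simp [Ne.symm hk]),
                List.find?_cons_of_neg (by simp [Ne.symm hk])] at h
              exact h
          rw [ih t2 ht1 ht2 htails]

-- pvLast is insensitive to the stable sort (per-key filter is unchanged)
theorem pvLast_sorted (l : List (String × String)) (k : String) :
    pvLast (PySem.List.sorted l (fun p => p.1)) k = pvLast l k := by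
  unfold pvLast
  rw [pvFilter_sorted]

theorem pvMapOr (k : String) (a b : Option (String × String))
    (ha : ∀ p, a = some p → p.1 = k) (hb : ∀ p, b = some p → p.1 = k) :
    ((a.map Prod.snd).or (b.map Prod.snd)).map (fun v => (k, v)) = a.or b := by
  cases a with
  | some p =>
      simp only [Option.map_some, Option.some_or]
      have := ha p rfl
      cases p
      simp_all
  | none =>
      cases b with
      | some p =>
          simp only [Option.map_some, Option.map_none, Option.none_or]
          have := hb p rfl
          cases p
          simp_all
      | none => simp

-- ===== VERDICT (by name: the statement is the Claim_ definition above) =====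
theorem merge_cookie_kv_py_spec : Claim_equal_merge_cookie_kv_py := by
  intro e n _
  unfold Spec_merge_cookie_kv_py
  simp only [merge_cookie_kv_py, merge_cookie_kv_py_alt, List.foldl_cons, List.foldl_nil]
  have hcook : ∀ (s : String) (acc : List (String × String)),
      (if s = "" then acc
       else ((PySem.Str.split? s ";").getD []).foldl (fun pairs part =>
        if PySem.Str.strip part = "" || !(PySem.Str.isIn "=" (PySem.Str.strip part)) then pairs
        else
          match (PySem.Str.splitMax? (PySem.Str.strip part) "=" 1).getD [] with
          | k :: v :: _ =>
              if PySem.Str.strip k ≠ "" then pairs ++ [(PySem.Str.strip k, PySem.Str.strip v)]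
              else pairs
          | _ => pairs) acc)
      = acc ++ pvKVs s := by
    intro s acc
    split_ifs with h
    · subst h; rw [pvKVs_empty]; simp
    · rw [pvBFold_eq]; rfl
  rw [hcook, hcook, List.nil_append]
  rw [pvParse_eq e, pvParse_eq n]
  have hndE := pvNodup_keys (pvKVs e)
  have hndN := pvNodup_keys (pvKVs n)
  have hndA : ((PySem.Dict.empty.update (pvKVs e)).update
      (PySem.Dict.empty.update (pvKVs n)).items).keys.Nodup :=
    PySem.Dict.nodup_keys_update _ _ hndE
  rw [pvSorted2_eq_sorted _ (List.inj_on_of_nodup_map (by simpa [PySem.Dict.keys] using hndA))]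
  rw [show (fun (merged : List (String × String)) (kv : String × String) =>
      match merged.getLast? with
      | some last => if last.1 = kv.1 then merged.dropLast ++ [kv] else merged ++ [kv]
      | none => merged ++ [kv]) = pvStepB from rfl]
  -- B side: dedup invariant with acc = []
  have hsle := PySem.List.sorted_pairwise (pvKVs e ++ pvKVs n) (fun p => p.1)
  obtain ⟨hBP, hBF⟩ := pvDedup_invariant
    (PySem.List.sorted (pvKVs e ++ pvKVs n) (fun p => p.1)) [] hsle (by simp) (by simp)
    (by intro p hp; simp at hp)
  -- A side
  have hAP : (PySem.List.sorted ((PySem.Dict.empty.update (pvKVs e)).update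
      (PySem.Dict.empty.update (pvKVs n)).items).items (fun p => p.1)).Pairwise
      (fun a b => a.1 < b.1) :=
    pvPairwise_lt _ (by simpa [PySem.Dict.keys] using hndA)
  have hAF : ∀ k, (PySem.List.sorted ((PySem.Dict.empty.update (pvKVs e)).update
      (PySem.Dict.empty.update (pvKVs n)).items).items (fun p => p.1)).find?
        (fun p => p.1 == k)
      = pvLast (pvKVs e ++ pvKVs n) k := by
    intro k
    rw [← pvFind?_perm _ _ k (by simpa [PySem.Dict.keys] using hndA)
      (PySem.List.sorted_perm _ _ _).symm]
    rw [pvFind?_items _ k hndA]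
    rw [pvGet?_update, pvRebuild _ hndN, pvGet?_update_last, pvGet?_update_last,
      pvLast_append]
    exact pvMapOr k _ _ (fun p hp => pvLast_fst _ _ _ hp) (fun p hp => pvLast_fst _ _ _ hp)
  have hlists := pvStrictExt _ _ hAP hBP (fun k => by
    rw [hAF k, hBF k, pvLast_sorted]
    simp)
  rw [hlists]
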